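-- pv_equiv track=rewrite | github.com/EdsonEddy/perfilTesis2 | workspace_thesis/dataset/py-tests/1079/144785.py | Oc
-- ===== SOURCE A (Python) =====
-- def Oc(x):
--     c=0
--     for i in range(len(x)-1):
--         if x[i]==x[i+1]:
--             if (x[i]=='e'and x[i+1]=='e') or (x[i]=='o' and x[i+1]=='o'):
--                c+=1
--             else:
--                 return False
--     return True
-- ===== SOURCE B (Python) =====
-- def Oc(x):
--     # Scan maximal runs of equal characters with two pointers; a run of
--     # length >= 2 is only allowed for 'e' and 'o'.
--     n = len(x)
--     i = 0
--     while i < n: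
--         j = i + 1
--         while j < n and x[j] == x[i]:
--             j += 1
--         if j - i >= 2 and x[i] != 'e' and x[i] != 'o':
--             return False
--         i = j
--     return True
-- ===== Notes on version B (the rewrite author's own statement) =====
-- stated objective: alternative
-- what changed: B scans maximal runs of equal characters with two pointers and rejects any run of length >= 2 whose character is not 'e' or 'o', instead of A's index loop over adjacent pairs with a dead counter.
import Mathlib
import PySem

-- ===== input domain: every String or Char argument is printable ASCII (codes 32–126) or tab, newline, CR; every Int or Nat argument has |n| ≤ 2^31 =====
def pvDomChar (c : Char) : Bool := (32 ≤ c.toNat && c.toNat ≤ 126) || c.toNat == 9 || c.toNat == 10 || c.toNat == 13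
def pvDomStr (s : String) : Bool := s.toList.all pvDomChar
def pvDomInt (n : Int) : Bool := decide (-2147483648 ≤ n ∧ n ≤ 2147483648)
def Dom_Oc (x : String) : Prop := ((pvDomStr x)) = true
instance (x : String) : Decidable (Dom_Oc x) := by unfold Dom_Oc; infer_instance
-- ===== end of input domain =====

-- B is an alternative same-cost implementation: it scans maximal runs of equal
-- characters instead of A's adjacent-index comparisons; return values proved equal.

-- ===== PORT A =====
-- A's loop: for i in range(len(x)-1), comparing x[i] and x[i+1]; the counter c is
-- dead state and is omitted (it never affects the return value).
def ocLoop (cs : List Char) (i : Nat) : Bool :=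
  if h : i + 1 < cs.length then
    if cs[i]'(by omega) = cs[i + 1] then
      if (cs[i]'(by omega) = 'e' ∧ cs[i + 1] = 'e') ∨ (cs[i]'(by omega) = 'o' ∧ cs[i + 1] = 'o') then
        ocLoop cs (i + 1)
      else
        false
    else
      ocLoop cs (i + 1)
  else
    true
termination_by cs.length - i

def Oc (x : String) : Bool := ocLoop x.toList 0

-- ===== PORT B =====
-- B's outer while-loop over runs: the inner 'while x[j] == x[i]' scan is takeWhile,
-- advancing i to j is dropWhile.
def ocRuns (cs : List Char) : Bool :=
  match cs with
  | [] => true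
  | c :: rest =>
    if (rest.takeWhile (· = c)).length + 1 ≥ 2 ∧ c ≠ 'e' ∧ c ≠ 'o' then
      false
    else
      ocRuns (rest.dropWhile (· = c))
termination_by cs.length
decreasing_by
  simp only [List.length_cons]
  have := List.length_dropWhile_le (p := (· = c)) (l := rest)
  omega

def Oc_alt (x : String) : Bool := ocRuns x.toList

-- ===== PRECONDITION & SPEC =====
def Spec_Oc (x : String) (out : Bool) : Prop := out = Oc_alt x
instance (x : String) (out : Bool) : Decidable (Spec_Oc x out) := by unfold Spec_Oc; infer_instance

-- ===== CLAIM (what is proved, stated in full; the proofs are below) =====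
def Claim_equal_Oc : Prop := ∀ (x : String), Dom_Oc x → Spec_Oc x (Oc x)

-- ===== LEMMAS AND PROOFS =====

-- common reference predicate: adjacent equal pairs are only allowed for 'e'/'o'
def adjOK : List Char → Bool
  | a :: b :: rest =>
    if a = b then (if a = 'e' ∨ a = 'o' then adjOK (b :: rest) else false)
    else adjOK (b :: rest)
  | _ => true

theorem ocLoop_eq_adjOK (cs : List Char) (i : Nat) : ocLoop cs i = adjOK (cs.drop i) := by
  fun_induction ocLoop cs i with
  | case1 i h h2 h3 ih =>
    rw [ih]
    have hd : cs.drop i = cs[i] :: cs[i+1] :: cs.drop (i+2) := by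
      rw [List.drop_eq_getElem_cons (by omega), List.drop_eq_getElem_cons (h := h)]
    rw [hd]
    simp only [adjOK, if_pos h2]
    have heo : cs[i] = 'e' ∨ cs[i] = 'o' := by
      rcases h3 with ⟨h4, _⟩ | ⟨h4, _⟩ <;> simp [h4]
    rw [if_pos heo, List.drop_eq_getElem_cons (h := h)]
  | case2 i h h2 h3 =>
    have hd : cs.drop i = cs[i] :: cs[i+1] :: cs.drop (i+2) := by
      rw [List.drop_eq_getElem_cons (by omega), List.drop_eq_getElem_cons (h := h)]
    rw [hd]
    simp only [adjOK, if_pos h2]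
    rw [if_neg]
    intro heo
    apply h3
    rcases heo with h4 | h4
    · exact Or.inl ⟨h4, h2 ▸ h4⟩
    · exact Or.inr ⟨h4, h2 ▸ h4⟩
  | case3 i h h2 ih =>
    rw [ih]
    have hd : cs.drop i = cs[i] :: cs.drop (i+1) := List.drop_eq_getElem_cons (by omega)
    rw [hd]
    have hd2 : cs.drop (i+1) = cs[i+1] :: cs.drop (i+2) := List.drop_eq_getElem_cons (h := h)
    rw [hd2]
    simp only [adjOK, if_neg h2]
  | case4 i h =>
    -- drop i has length ≤ 1
    have : (cs.drop i).length ≤ 1 := by simp [List.length_drop]; omega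
    match hcs : cs.drop i with
    | [] => simp [adjOK]
    | [a] => simp [adjOK]
    | a :: b :: r => rw [hcs] at this; simp at this

theorem ocRuns_skip (c : Char) (rest : List Char) (heo : c = 'e' ∨ c = 'o') :
    ocRuns (c :: rest) = ocRuns (rest.dropWhile (· = c)) := by
  rw [ocRuns]
  rw [if_neg]
  rintro ⟨-, he, ho⟩
  rcases heo with h | h <;> [exact he h; exact ho h]

theorem ocRuns_eq_adjOK (cs : List Char) : ocRuns cs = adjOK cs := by
  induction hn : cs.length using Nat.strong_induction_on generalizing cs with
  | _ n ih =>
  match cs with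
  | [] => simp [ocRuns, adjOK]
  | [c] => simp [ocRuns, adjOK, List.takeWhile, List.dropWhile]
  | c :: b :: rest =>
    by_cases hbc : b = c
    · subst hbc
      by_cases heo : b = 'e' ∨ b = 'o'
      · rw [ocRuns_skip b _ heo]
        simp only [adjOK, if_pos heo]
        have hdw : (b :: rest).dropWhile (· = b) = rest.dropWhile (· = b) := by
          simp [List.dropWhile]
        rw [hdw, ← ocRuns_skip b rest heo]
        have hlen : (b :: rest).length < n := by subst hn; simp
        exact ih _ hlen (b :: rest) rfl
      · rw [ocRuns, if_pos ⟨by simp [List.takeWhile], fun h => heo (Or.inl h), fun h => heo (Or.inr h)⟩]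
        simp [adjOK, heo]
    · rw [ocRuns]
      have htw : (b :: rest).takeWhile (· = c) = [] := by
        simp [List.takeWhile, hbc]
      have hdw : (b :: rest).dropWhile (· = c) = b :: rest := by
        simp [List.dropWhile, hbc]
      rw [if_neg (by rw [htw]; rintro ⟨h, -⟩; simp at h), hdw]
      have : adjOK (c :: b :: rest) = adjOK (b :: rest) := by
        simp only [adjOK]
        rw [if_neg (fun h => hbc (Eq.symm h))]
      rw [this]
      have hlen : (b :: rest).length < n := by subst hn; simp
      exact ih _ hlen (b :: rest) rfl

-- ===== VERDICT (by name: the statement is the Claim_ definition above) =====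
theorem Oc_spec : Claim_equal_Oc := by
  intro x _
  unfold Spec_Oc Oc Oc_alt
  rw [ocLoop_eq_adjOK, List.drop_zero, ocRuns_eq_adjOK]
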